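-- pv_equiv track=rewrite | github.com/AleksandraSzoldra/Array | zad26.py | separator
-- ===== SOURCE A (Python) =====
-- def separator(array):
--     even = ""
--     odd = ""
--     result = ""
--     for i in range (len(array)):
--         if array[i]%2==0:
--             even = even + str(array[i]) + " "
--         else:
--             odd = odd + str(array[i]) + " "
--
--     result = even + odd
--     return result
-- ===== SOURCE B (Python) =====
-- def separator(array):
--     evens = [str(x) for x in array if x % 2 == 0]
--     odds = [str(x) for x in array if x % 2 != 0]
--     return ''.join(s + ' ' for s in evens) + ''.join(s + ' ' for s in odds)
-- ===== Notes on version B (the rewrite author's own statement) =====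
-- stated objective: faster
-- what changed: Replaced A's single indexed loop with two interleaved string accumulators by two independent filtering comprehensions whose formatted elements are joined once.
import Mathlib
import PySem

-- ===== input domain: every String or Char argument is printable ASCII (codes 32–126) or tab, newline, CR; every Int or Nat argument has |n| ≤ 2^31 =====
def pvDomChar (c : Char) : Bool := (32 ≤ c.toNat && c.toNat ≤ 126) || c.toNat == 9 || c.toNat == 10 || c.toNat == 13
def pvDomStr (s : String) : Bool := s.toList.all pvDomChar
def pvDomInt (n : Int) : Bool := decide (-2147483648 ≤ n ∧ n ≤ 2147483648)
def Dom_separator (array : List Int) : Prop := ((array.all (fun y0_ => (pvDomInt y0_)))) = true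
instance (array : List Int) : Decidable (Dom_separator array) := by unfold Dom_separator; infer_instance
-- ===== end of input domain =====

-- B builds the evens and odds by two independent filtering passes and joins once, instead of A's
-- single indexed loop growing two accumulator strings; return values are identical.

-- ===== PORT A =====
def separator (array : List Int) : String :=
  String.ofList
    (((PySem.List.pyRange 0 (PySem.List.len array) 1).foldl
      (fun (p : List Char × List Char) i =>
        if PySem.Int.mod (PySem.List.pyGetD array i 0) 2 == 0 then
          (p.1 ++ PySem.Int.toChars (PySem.List.pyGetD array i 0) ++ [' '], p.2)
        else (p.1, p.2 ++ PySem.Int.toChars (PySem.List.pyGetD array i 0) ++ [' ']))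
      ([], [])).1 ++
     ((PySem.List.pyRange 0 (PySem.List.len array) 1).foldl
      (fun (p : List Char × List Char) i =>
        if PySem.Int.mod (PySem.List.pyGetD array i 0) 2 == 0 then
          (p.1 ++ PySem.Int.toChars (PySem.List.pyGetD array i 0) ++ [' '], p.2)
        else (p.1, p.2 ++ PySem.Int.toChars (PySem.List.pyGetD array i 0) ++ [' ']))
      ([], [])).2)

-- ===== PORT B =====
def separator_alt (array : List Int) : String :=
  String.ofList
    ((((array.filter (fun x => PySem.Int.mod x 2 == 0)).map PySem.Int.toChars).map
        (fun s => s ++ [' '])).flatten ++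
     (((array.filter (fun x => !(PySem.Int.mod x 2 == 0))).map PySem.Int.toChars).map
        (fun s => s ++ [' '])).flatten)

-- ===== PRECONDITION & SPEC =====
def Spec_separator (array : List Int) (out : String) : Prop := out = separator_alt array
instance (array : List Int) (out : String) : Decidable (Spec_separator array out) := by unfold Spec_separator; infer_instance

-- ===== CLAIM (what is proved, stated in full; the proofs are below) =====
def Claim_equal_separator : Prop := ∀ (array : List Int), Dom_separator array → Spec_separator array (separator array)

-- ===== LEMMAS AND PROOFS =====

-- A's loop, started from any accumulators (e, o), appends exactly the joined evens/odds of the rest.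
theorem separator_loop (array : List Int) (e o : List Char) :
    array.foldl
      (fun (p : List Char × List Char) x =>
        if PySem.Int.mod x 2 == 0 then (p.1 ++ PySem.Int.toChars x ++ [' '], p.2)
        else (p.1, p.2 ++ PySem.Int.toChars x ++ [' ']))
      (e, o)
    = (e ++ (((array.filter (fun x => PySem.Int.mod x 2 == 0)).map PySem.Int.toChars).map (fun s => s ++ [' '])).flatten,
       o ++ (((array.filter (fun x => !(PySem.Int.mod x 2 == 0))).map PySem.Int.toChars).map (fun s => s ++ [' '])).flatten) := by
  induction array generalizing e o with
  | nil => simp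
  | cons x xs ih =>
    simp only [List.foldl_cons, List.filter_cons]
    by_cases h : PySem.Int.mod x 2 == 0
    · rw [if_pos h, ih]
      have hd : (2:Int) ∣ x := (PySem.Int.mod_eq_zero_iff_dvd x 2).mp (by simpa using h)
      have hm : x % 2 = 0 := Int.emod_eq_zero_of_dvd hd
      simp [h, hd, hm, List.append_assoc]
    · have hf : (PySem.Int.mod x 2 == 0) = false := by simpa using h
      rw [if_neg h, ih]
      have hnd : ¬ (2:Int) ∣ x := fun hd => h (by simpa using (PySem.Int.mod_eq_zero_iff_dvd x 2).mpr hd)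
      have hm : x % 2 = 1 := by
        rcases Int.emod_two_eq x with h0 | h1
        · exact absurd (Int.dvd_of_emod_eq_zero h0) hnd
        · exact h1
      simp [hf, hnd, hm, List.append_assoc]

-- ===== VERDICT (by name: the statement is the Claim_ definition above) =====
theorem separator_spec : Claim_equal_separator := by
  intro array _
  unfold Spec_separator separator separator_alt
  rw [PySem.List.foldl_pyRange_zero_pyGetD array (0 : Int)
    (fun (p : List Char × List Char) x =>
      if PySem.Int.mod x 2 == 0 then (p.1 ++ PySem.Int.toChars x ++ [' '], p.2)
      else (p.1, p.2 ++ PySem.Int.toChars x ++ [' '])) (([], []) : List Char × List Char)]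
  rw [separator_loop]
  simp
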